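-- pv_equiv track=rewrite | github.com/vanschependom/KULAK_beginselen-van-programmeren | HC6/slides-les6-recursie.py | palindromen
-- ===== SOURCE A (Python) =====
-- def palindromen(lengte, letters):
--     if lengte == 0:
--         return [""]
--     if lengte == 1:
--         return list(letters)
--     result = []
--     # Zoek de palindromen van lengte-2
--     kleinerePalindromen = palindromen(lengte-2, letters)
--     # en kleef elke letter er eens voor en na
--     for p in kleinerePalindromen:
--         for l in letters:
--             result.append(l+p+l)
--     return result
-- ===== SOURCE B (Python) =====
-- def palindromen(lengte, letters):
--     # Build only the first halves iteratively, then mirror them.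
--     # Halves are built with the new letter PREPENDED so that the outermost
--     # letter of the palindrome varies fastest, matching A's output order.
--     halves = [""]
--     for _ in range(lengte // 2):
--         halves = [l + h for h in halves for l in letters]
--     if lengte % 2 == 0:
--         return [h + h[::-1] for h in halves]
--     return [h + c + h[::-1] for c in letters for h in halves]
-- ===== Notes on version B (the rewrite author's own statement) =====
-- stated objective: simpler
-- what changed: Replaces A's recursion on lengte-2 (wrapping every smaller palindrome in each letter) by an iterative construction of only the first halves, each palindrome emitted as half + (center) + reversed half in A's exact order.
import Mathlib
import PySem

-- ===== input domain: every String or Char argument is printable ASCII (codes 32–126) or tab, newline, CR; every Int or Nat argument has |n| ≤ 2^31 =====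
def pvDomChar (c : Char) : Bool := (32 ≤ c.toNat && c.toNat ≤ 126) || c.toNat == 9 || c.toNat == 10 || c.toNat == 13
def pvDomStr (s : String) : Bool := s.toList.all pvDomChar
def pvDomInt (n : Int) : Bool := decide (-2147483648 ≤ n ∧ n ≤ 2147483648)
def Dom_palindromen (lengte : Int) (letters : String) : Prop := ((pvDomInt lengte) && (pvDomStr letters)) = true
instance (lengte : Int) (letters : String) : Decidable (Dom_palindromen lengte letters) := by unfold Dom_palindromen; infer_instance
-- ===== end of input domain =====

-- B builds only the first halves of the palindromes iteratively and mirrors them,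
-- replacing A's recursion on lengte-2 (objective: simpler, no recursion).

-- ===== PORT A =====
-- Strings are built through List Char (String.ofList/toList), as the PySem prelude prescribes.
def palindromen (lengte : Int) (letters : String) : List String :=
  if lengte = 0 then [""]
  else if lengte = 1 then letters.toList.map (fun l => String.ofList [l])
  else if lengte < 0 then []  -- Python's recursion never reaches a base case here (RecursionError); outside Pre_
  else
    (palindromen (lengte - 2) letters).foldl
      (fun result p => letters.toList.foldl
        (fun result l => result ++ [String.ofList ([l] ++ p.toList ++ [l])]) result) []
termination_by lengte.toNat
decreasing_by omega

-- ===== PORT B =====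
def palindromen_alt (lengte : Int) (letters : String) : List String :=
  -- halves = [""] ; for _ in range(lengte // 2): halves = [l + h for h in halves for l in letters]
  let halves := (PySem.List.pyRange 0 (PySem.Int.floordiv lengte 2) 1).foldl
    (fun halves _ =>
      halves.flatMap (fun h => letters.toList.map (fun l => String.ofList ([l] ++ h.toList)))) [""]
  if PySem.Int.mod lengte 2 = 0 then
    -- [h + h[::-1] for h in halves]  (h[::-1] is h reversed, cf. PySem.Str.slice?_none_none_neg_one)
    halves.map (fun h => String.ofList (h.toList ++ h.toList.reverse))
  else
    -- [h + c + h[::-1] for c in letters for h in halves]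
    letters.toList.flatMap (fun c =>
      halves.map (fun h => String.ofList (h.toList ++ [c] ++ h.toList.reverse)))

-- ===== PRECONDITION & SPEC =====
-- On lengte < 0 the Python A recurses on lengte-2 forever (RecursionError), so it never returns.
def Pre_palindromen (lengte : Int) (letters : String) : Prop := 0 ≤ lengte
instance (lengte : Int) (letters : String) : Decidable (Pre_palindromen lengte letters) := by
  unfold Pre_palindromen; infer_instance
def pvWitness_palindromen : Int × String := (4, "ab")

def Spec_palindromen (lengte : Int) (letters : String) (out : List String) : Prop := out = palindromen_alt lengte letters
instance (lengte : Int) (letters : String) (out : List String) : Decidable (Spec_palindromen lengte letters out) := by unfold Spec_palindromen; infer_instance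

-- ===== CLAIM (what is proved, stated in full; the proofs are below) =====
def Claim_equal_palindromen : Prop := ∀ (lengte : Int) (letters : String), Dom_palindromen lengte letters → Pre_palindromen lengte letters → Spec_palindromen lengte letters (palindromen lengte letters)

-- ===== LEMMAS AND PROOFS =====

-- The "first halves" of length m, at the List Char level, in B's construction order.
def halvesC (L : List Char) : Nat → List (List Char)
  | 0 => [[]]
  | m + 1 => (halvesC L m).flatMap (fun h => L.map (fun l => l :: h))

-- A's recursion at the List Char level.
def charA (L : List Char) : Nat → List (List Char)
  | 0 => [[]]
  | 1 => L.map (fun l => [l])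
  | n + 2 => (charA L n).flatMap (fun p => L.map (fun l => l :: (p ++ [l])))

theorem charA_even (L : List Char) (m : Nat) :
    charA L (2 * m) = (halvesC L m).map (fun h => h ++ h.reverse) := by
  induction m with
  | zero => simp [charA, halvesC]
  | succ m ih =>
    have h2 : 2 * (m + 1) = 2 * m + 2 := by ring
    rw [h2, charA, ih, halvesC]
    simp [List.map_flatMap, List.flatMap_map, List.map_map, Function.comp_def]

theorem charA_odd (L : List Char) (m : Nat) :
    charA L (2 * m + 1) = L.flatMap (fun c => (halvesC L m).map (fun h => h ++ c :: h.reverse)) := by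
  induction m with
  | zero =>
    simp only [charA, halvesC, List.flatMap]
    induction L with
    | nil => simp
    | cons a L ihL => simp [ihL]
  | succ m ih =>
    have h2 : 2 * (m + 1) + 1 = (2 * m + 1) + 2 := by ring
    rw [h2, charA, ih, halvesC]
    simp [List.map_flatMap, List.flatMap_map, List.flatMap_assoc, List.map_map, Function.comp_def]

theorem palindromen_char (letters : String) : ∀ n : Nat,
    palindromen (n : Int) letters = (charA letters.toList n).map String.ofList
  | 0 => by rw [palindromen]; simp [charA]
  | 1 => by rw [palindromen]; simp [charA]
  | n + 2 => by
    have ih := palindromen_char letters n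
    rw [palindromen]
    rw [if_neg (by omega), if_neg (by omega), if_neg (by omega)]
    have hsub : (((n + 2 : Nat)) : Int) - 2 = (n : Int) := by push_cast; ring
    rw [hsub, ih]
    simp only [PySem.List.foldl_append_singleton_eq_map, PySem.List.foldl_append_eq_flatMap,
      List.nil_append, charA]
    simp [List.map_flatMap, List.flatMap_map, List.map_map, Function.comp_def]

theorem halves_fold (letters : String) (k : Nat) :
    (PySem.List.pyRange 0 (k : Int) 1).foldl
      (fun halves _ =>
        halves.flatMap (fun h => letters.toList.map (fun l => String.ofList ([l] ++ h.toList)))) [""]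
      = (halvesC letters.toList k).map String.ofList := by
  induction k with
  | zero => simp [halvesC, PySem.List.pyRange]
  | succ k ih =>
    have hc : (((k + 1 : Nat)) : Int) = (k : Int) + 1 := by push_cast; ring
    rw [hc, PySem.List.pyRange_one_succ_right (by positivity), List.foldl_append, ih]
    simp [halvesC, List.map_flatMap, List.flatMap_map, List.map_map, Function.comp_def]

theorem palindromen_eq_alt_nat (n : Nat) (letters : String) :
    palindromen (n : Int) letters = palindromen_alt (n : Int) letters := by
  have hdiv : PySem.Int.floordiv (n : Int) 2 = ((n / 2 : Nat) : Int) := by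
    exact_mod_cast PySem.Int.floordiv_natCast n 2
  have hmod : PySem.Int.mod (n : Int) 2 = ((n % 2 : Nat) : Int) := by
    exact_mod_cast PySem.Int.mod_natCast n 2
  unfold palindromen_alt
  rw [hdiv, hmod, halves_fold letters (n / 2), palindromen_char letters n]
  rcases Nat.even_or_odd n with he | ho
  · have h0 : n % 2 = 0 := Nat.even_iff.mp he
    have hn : n = 2 * (n / 2) := by omega
    rw [if_pos (by rw [h0]; simp)]
    rw [show charA letters.toList n = charA letters.toList (2 * (n / 2)) by rw [← hn], charA_even]
    simp [List.map_map, Function.comp_def]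
  · have h1 : n % 2 = 1 := Nat.odd_iff.mp ho
    have hn : n = 2 * (n / 2) + 1 := by omega
    rw [if_neg (by rw [h1]; simp)]
    rw [show charA letters.toList n = charA letters.toList (2 * (n / 2) + 1) by rw [← hn], charA_odd]
    simp [List.map_flatMap, List.map_map, Function.comp_def]

-- ===== VERDICT (by name: the statement is the Claim_ definition above) =====
theorem palindromen_spec : Claim_equal_palindromen := by
  intro lengte letters _ hpre
  unfold Spec_palindromen
  lift lengte to ℕ using hpre
  exact palindromen_eq_alt_nat lengte letters
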